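-- pv_equiv track=rewrite | github.com/avrae/avrae | test/inline_rolling_bench.py | _find_roll_expr_indices
-- ===== SOURCE A (Python) =====
-- def _find_roll_expr_indices(content):
--     """
--     Returns an iterator of tuples (start, expr_start, expr_end, end) representing the indices of the roll exprs found
--     (outside and inside the braces).
--     """
--     content_len = len(content)
--     end = 0
--     while (start := content.find('[[', end)) != -1:
--         end = content.find(']]', start)
--         if end == -1:
--             break
--         if end + 2 < content_len and content[end + 2] == ']':
--             end += 1
--         yield start, start + 2, end, end + 2
-- ===== SOURCE B (Python) =====
-- def _find_roll_expr_indices(content):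
--     """Two staged passes index every '[[' and ']]' occurrence, then a pairing walk over
--     the two sorted index lists yields the tuples (no substring searching in the loop)."""
--     n = len(content)
--     opens = [i for i in range(n - 1) if content[i] == '[' and content[i + 1] == '[']
--     closes = [i for i in range(n - 1) if content[i] == ']' and content[i + 1] == ']']
--     oi = 0
--     ci = 0
--     end = 0
--     while True:
--         while oi < len(opens) and opens[oi] < end:
--             oi += 1
--         if oi == len(opens):
--             return
--         start = opens[oi]
--         oi += 1
--         while ci < len(closes) and closes[ci] < start:
--             ci += 1
--         if ci == len(closes):
--             return
--         e = closes[ci]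
--         if e + 2 < n and content[e + 2] == ']':
--             e += 1
--         yield start, start + 2, e, e + 2
--         end = e
-- ===== Notes on version B (the rewrite author's own statement) =====
-- stated objective: alternative
-- what changed: Replaced the repeated str.find substring searches with two staged indexing passes that collect every '[[' and ']]' position up front, followed by a pairing walk with two monotone pointers over the sorted index lists (no substring search in the loop).
import Mathlib
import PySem

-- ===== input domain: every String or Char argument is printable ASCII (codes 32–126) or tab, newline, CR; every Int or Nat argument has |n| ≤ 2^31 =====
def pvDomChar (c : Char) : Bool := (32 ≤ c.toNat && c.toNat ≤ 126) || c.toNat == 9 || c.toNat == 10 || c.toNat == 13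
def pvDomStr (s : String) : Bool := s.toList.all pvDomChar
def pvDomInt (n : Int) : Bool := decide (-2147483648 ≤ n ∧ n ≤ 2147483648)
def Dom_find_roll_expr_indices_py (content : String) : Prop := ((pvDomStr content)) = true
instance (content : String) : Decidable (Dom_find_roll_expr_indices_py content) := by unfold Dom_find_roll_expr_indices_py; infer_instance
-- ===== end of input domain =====

-- B replaces A's repeated str.find calls by two staged indexing passes (all '[[' and ']]'
-- positions collected up front) plus a pairing walk over the two sorted index lists;
-- same return value, no speed claim (both are linear).

-- ===== PORT A =====
-- A's while loop, fueled (each iteration advances the search index by ≥ 1, so length+1 fuel suffices).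
-- content[end+2] == ']' is ported as pyGet? … = some ']' (in range by the guard end+2 < len).
def pvLoopA (content : String) (contentLen : Int) (e : Int) : Nat → List (Int × Int × Int × Int)
  | 0 => []
  | fuel + 1 =>
    let start := PySem.Str.findFrom content "[[" e
    if start = -1 then []
    else
      let e1 := PySem.Str.findFrom content "]]" start
      if e1 = -1 then []
      else
        let e2 := if e1 + 2 < contentLen ∧ PySem.Str.pyGet? content (e1 + 2) = some ']' then e1 + 1 else e1
        (start, start + 2, e2, e2 + 2) :: pvLoopA content contentLen e2 fuel

def find_roll_expr_indices_py (content : String) : List (Int × Int × Int × Int) :=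
  pvLoopA content (PySem.Str.len content) 0 (content.toList.length + 1)

-- ===== PORT B =====
-- B's inner 'while pointer < len and list[pointer] < bound: pointer += 1' loops, as the
-- remaining suffix of the index list (advancing the pointer = dropping the head).
def pvSkip (bound : Int) : List Int → List Int
  | [] => []
  | i :: rest => if i < bound then pvSkip bound rest else i :: rest

lemma pvSkip_length_le (bound : Int) (l : List Int) : (pvSkip bound l).length ≤ l.length := by
  induction l with
  | nil => simp [pvSkip]
  | cons i rest ih =>
    rw [pvSkip]
    split_ifs
    · exact le_trans ih (by simp)
    · simp

-- B's outer while loop: pair the remaining open positions with the remaining close positions.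
def pvPair (content : String) (n : Int) (os cls : List Int) (e : Int) :
    List (Int × Int × Int × Int) :=
  match hos : pvSkip e os with
  | [] => []
  | start :: os' =>
    match pvSkip start cls with
    | [] => []
    | e1 :: cls' =>
      let e2 := if e1 + 2 < n ∧ PySem.Str.pyGet? content (e1 + 2) = some ']' then e1 + 1 else e1
      (start, start + 2, e2, e2 + 2) :: pvPair content n os' (e1 :: cls') e2
  termination_by os.length
  decreasing_by
    have h := pvSkip_length_le e os
    rw [hos] at h
    simp at h
    omega

-- The two staged passes (the list comprehensions of Source B), then the pairing walk.
def find_roll_expr_indices_py_alt (content : String) : List (Int × Int × Int × Int) :=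
  let n := PySem.Str.len content
  let opens := (PySem.List.pyRange 0 (n - 1) 1).filter
    (fun i => decide (PySem.Str.pyGet? content i = some '[' ∧ PySem.Str.pyGet? content (i + 1) = some '['))
  let closes := (PySem.List.pyRange 0 (n - 1) 1).filter
    (fun i => decide (PySem.Str.pyGet? content i = some ']' ∧ PySem.Str.pyGet? content (i + 1) = some ']'))
  pvPair content n opens closes 0

-- ===== PRECONDITION & SPEC =====
def Spec_find_roll_expr_indices_py (content : String) (out : List (Int × Int × Int × Int)) : Prop := out = find_roll_expr_indices_py_alt content
instance (content : String) (out : List (Int × Int × Int × Int)) : Decidable (Spec_find_roll_expr_indices_py content out) := by unfold Spec_find_roll_expr_indices_py; infer_instance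

-- ===== CLAIM (what is proved, stated in full; the proofs are below) =====
def Claim_equal_find_roll_expr_indices_py : Prop := ∀ (content : String), Dom_find_roll_expr_indices_py content → Spec_find_roll_expr_indices_py content (find_roll_expr_indices_py content)

-- ===== LEMMAS AND PROOFS =====

-- The occurrence list of a two-character pattern, as B's comprehension computes it.
def pvOccs (content : String) (a b : Char) : List Int :=
  (PySem.List.pyRange 0 (PySem.Str.len content - 1) 1).filter
    (fun i => decide (PySem.Str.pyGet? content i = some a ∧ PySem.Str.pyGet? content (i + 1) = some b))

lemma pvPref_iff (cs : List Char) (a b : Char) (k : Nat) (h : k + 1 < cs.length) :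
    [a, b] <+: cs.drop k ↔ cs[k] = a ∧ cs[k + 1] = b := by
  constructor
  · intro hp
    have e0 := hp.getElem (i := 0) (by simp)
    have e1 := hp.getElem (i := 1) (by simp)
    simp [List.getElem_drop] at e0 e1
    exact ⟨e0.symm, e1.symm⟩
  · rintro ⟨ha, hb⟩
    have d1 : cs.drop k = cs[k] :: cs.drop (k + 1) := List.drop_eq_getElem_cons (by omega)
    have d2 : cs.drop (k + 1) = cs[k + 1] :: cs.drop (k + 2) := List.drop_eq_getElem_cons h
    rw [d1, d2, ha, hb]
    simp [List.cons_prefix_cons]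

lemma pvGetCond (content : String) (k : Nat) (hk : k < content.toList.length) (c : Char) :
    (PySem.Str.pyGet? content (k : Int) = some c) ↔ content.toList[k] = c := by
  rw [PySem.Str.pyGet?_natCast, List.getElem?_eq_getElem hk]
  simp

-- membership in the occurrence list ↔ the two-char pattern is a prefix of the drop
lemma pvMemOccs (content : String) (a b : Char) (i : Nat) :
    ((i : Int) ∈ pvOccs content a b) ↔ [a, b] <+: content.toList.drop i := by
  rw [pvOccs, List.mem_filter, PySem.List.mem_pyRange_one, PySem.Str.len_eq]
  constructor
  · rintro ⟨⟨_h0, hlt⟩, hp⟩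
    have hlt' : i + 1 < content.toList.length := by omega
    simp only [decide_eq_true_eq] at hp
    have h1 := (pvGetCond content i (by omega) a).mp hp.1
    have h2 : content.toList[i + 1] = b := by
      have := hp.2
      rw [show ((i : Int) + 1) = ((i + 1 : Nat) : Int) by push_cast; ring] at this
      exact (pvGetCond content (i + 1) hlt' b).mp this
    exact (pvPref_iff content.toList a b i hlt').mpr ⟨h1, h2⟩
  · intro hp
    have hlen : i + 2 ≤ content.toList.length := by
      have := hp.length_le
      simp only [List.length_drop, List.length_cons, List.length_nil] at this
      omega
    have hlt' : i + 1 < content.toList.length := by omega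
    obtain ⟨h1, h2⟩ := (pvPref_iff content.toList a b i hlt').mp hp
    refine ⟨⟨by omega, by omega⟩, ?_⟩
    simp only [decide_eq_true_eq]
    refine ⟨(pvGetCond content i (by omega) a).mpr h1, ?_⟩
    rw [show ((i : Int) + 1) = ((i + 1 : Nat) : Int) by push_cast; ring]
    exact (pvGetCond content (i + 1) hlt' b).mpr h2

lemma pvOccs_nonneg (content : String) (a b : Char) (x : Int) (hx : x ∈ pvOccs content a b) :
    0 ≤ x := by
  rw [pvOccs, List.mem_filter, PySem.List.mem_pyRange_one] at hx
  exact hx.1.1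

lemma pvOccs_pairwise (content : String) (a b : Char) :
    (pvOccs content a b).Pairwise (· < ·) :=
  (PySem.List.pairwise_lt_pyRange_one 0 (PySem.Str.len content - 1)).filter _

-- pvSkip is a dropWhile: the dropped prefix is exactly an initial run of elements < bound
lemma pvSkip_decomp (bound : Int) (l : List Int) :
    ∃ d, l = d ++ pvSkip bound l ∧ ∀ x ∈ d, x < bound := by
  induction l with
  | nil => exact ⟨[], by simp [pvSkip]⟩
  | cons i rest ih =>
    rw [pvSkip]
    split_ifs with h
    · obtain ⟨d, hd, hlt⟩ := ih
      exact ⟨i :: d, by simpa using hd, by simpa [h] using hlt⟩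
    · exact ⟨[], by simp⟩

lemma pvSkip_head_ge (bound : Int) (l : List Int) (r : Int) (rest : List Int)
    (h : pvSkip bound l = r :: rest) : bound ≤ r := by
  induction l with
  | nil => simp [pvSkip] at h
  | cons i tl ih =>
    rw [pvSkip] at h
    split_ifs at h with hi
    · exact ih h
    · cases h; omega

lemma pvSkip_nil_all (bound : Int) (l : List Int) (h : pvSkip bound l = []) :
    ∀ x ∈ l, x < bound := by
  obtain ⟨d, hd, hlt⟩ := pvSkip_decomp bound l
  rw [h, List.append_nil] at hd
  rw [hd]
  exact hlt

-- skipping ignores an already-dropped prefix of elements below the bound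
lemma pvSkip_append (bound : Int) (d l : List Int) (hd : ∀ x ∈ d, x < bound) :
    pvSkip bound (d ++ l) = pvSkip bound l := by
  induction d with
  | nil => simp
  | cons i tl ih =>
    rw [List.cons_append, pvSkip, if_pos (hd i (by simp))]
    exact ih (fun x hx => hd x (by simp [hx]))

lemma pvFindFrom_eq_of (cs sub : List Char) (k r : Nat) (hk : k ≤ cs.length) (hkr : k ≤ r)
    (hr : sub <+: cs.drop r) (hmin : ∀ i, k ≤ i → i < r → ¬ sub <+: cs.drop i) :
    PySem.Chars.findFrom cs sub (k : Int) = (r : Int) := by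
  have hinf : sub <:+: cs.drop k := by
    have hdd : cs.drop r = (cs.drop k).drop (r - k) := by
      rw [List.drop_drop]; congr 1; omega
    have h1 : sub <:+: cs.drop r := hr.isInfix
    rw [hdd] at h1
    exact h1.trans (List.drop_suffix _ _).isInfix
  have hne : PySem.Chars.findFrom cs sub (k : Int) ≠ -1 := by
    rw [Ne, PySem.Chars.findFrom_natCast_eq_neg_one_iff cs sub k hk]
    intro hcon; exact hcon hinf
  obtain ⟨h1, h2, h3⟩ := PySem.Chars.findFrom_natCast_spec cs sub k hk hne
  have hge : ¬ (PySem.Chars.findFrom cs sub (k : Int)).toNat < r :=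
    fun hlt => hmin _ (by omega) hlt h2
  have hle : ¬ r < (PySem.Chars.findFrom cs sub (k : Int)).toNat :=
    fun hlt => h3 r hkr hlt hr
  omega

-- an infix of a drop is a prefix of a later drop
lemma pvInfix_drop (cs sub : List Char) (k : Nat) (h : sub <:+: cs.drop k) :
    ∃ j, k ≤ j ∧ sub <+: cs.drop j := by
  obtain ⟨t, ht, hpre⟩ := List.infix_iff_suffix_prefix.mp h
  have hm := List.suffix_iff_eq_drop.mp ht
  refine ⟨k + (t.length - sub.length), by omega, ?_⟩
  have hdd : cs.drop (k + (t.length - sub.length)) = (cs.drop k).drop (t.length - sub.length) := by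
    rw [List.drop_drop]
  rw [hdd]
  have hp2 := hpre.drop (t.length - sub.length)
  rw [← hm] at hp2
  exact hp2

-- findFrom equals the head of the skipped occurrence list (or -1 if it is empty)
lemma pvFind_eq (content : String) (a b : Char) (k : Nat) (hk : k ≤ content.toList.length) :
    PySem.Chars.findFrom content.toList [a, b] (k : Int) =
      (match pvSkip (k : Int) (pvOccs content a b) with
        | [] => -1
        | r :: _ => r) := by
  cases hs : pvSkip (k : Int) (pvOccs content a b) with
  | nil =>
    rw [PySem.Chars.findFrom_natCast_eq_neg_one_iff content.toList [a, b] k hk]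
    intro hinf
    obtain ⟨j, hkj, hpre⟩ := pvInfix_drop content.toList [a, b] k hinf
    have hmem : ((j : Int)) ∈ pvOccs content a b := (pvMemOccs content a b j).mpr hpre
    have := pvSkip_nil_all (k : Int) (pvOccs content a b) hs (j : Int) hmem
    omega
  | cons r rest =>
    have hge : (k : Int) ≤ r := pvSkip_head_ge _ _ _ _ hs
    obtain ⟨d, hd, hlt⟩ := pvSkip_decomp (k : Int) (pvOccs content a b)
    rw [hs] at hd
    have hmem : r ∈ pvOccs content a b := by rw [hd]; simp
    have h0r : 0 ≤ r := pvOccs_nonneg content a b r hmem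
    obtain ⟨rn, rfl⟩ : ∃ rn : Nat, r = (rn : Int) := ⟨r.toNat, by omega⟩
    have hpre : [a, b] <+: content.toList.drop rn := (pvMemOccs content a b rn).mp hmem
    refine pvFindFrom_eq_of content.toList [a, b] k rn hk (by exact_mod_cast hge) hpre ?_
    intro i hki hir hpi
    have himem : ((i : Int)) ∈ pvOccs content a b := (pvMemOccs content a b i).mpr hpi
    rw [hd] at himem
    rcases List.mem_append.mp himem with hin | hin
    · have := hlt _ hin; omega
    · rcases List.mem_cons.mp hin with heq | hin'
      · omega
      · -- i is after rn in the pairwise-< list, contradiction with i < rn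
        have hpw := pvOccs_pairwise content a b
        rw [hd] at hpw
        have := (List.pairwise_cons.mp (List.pairwise_append.mp hpw).2.1).1 _ hin'
        omega

-- the element at an occurrence has the pattern's first character
lemma pvOccs_char (content : String) (a b : Char) (i : Nat)
    (h : ((i : Int)) ∈ pvOccs content a b) :
    i + 1 < content.toList.length ∧ content.toList[i]'(by
      have := ((pvMemOccs content a b i).mp h).length_le
      simp only [List.length_drop, List.length_cons, List.length_nil] at this
      omega) = a := by
  have hp := (pvMemOccs content a b i).mp h
  have hlen : i + 2 ≤ content.toList.length := by
    have := hp.length_le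
    simp only [List.length_drop, List.length_cons, List.length_nil] at this
    omega
  exact ⟨by omega, ((pvPref_iff content.toList a b i (by omega)).mp hp).1⟩

-- unfolding lemmas for the pairing walk (one per shape of the two skips)
lemma pvPair_nil (content : String) (n : Int) (os cls : List Int) (e : Int)
    (h1 : pvSkip e os = []) : pvPair content n os cls e = [] := by
  rw [pvPair, h1]

lemma pvPair_cons_nil (content : String) (n : Int) (os cls : List Int) (e start : Int)
    (os' : List Int) (h1 : pvSkip e os = start :: os') (h2 : pvSkip start cls = []) :
    pvPair content n os cls e = [] := by
  rw [pvPair, h1]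
  show (match pvSkip start cls with
    | [] => ([] : List (Int × Int × Int × Int))
    | e1 :: cls' =>
      let e2 := if e1 + 2 < n ∧ PySem.Str.pyGet? content (e1 + 2) = some ']' then e1 + 1 else e1
      (start, start + 2, e2, e2 + 2) :: pvPair content n os' (e1 :: cls') e2) = []
  rw [h2]

lemma pvPair_cons_cons (content : String) (n : Int) (os cls : List Int) (e start e1 : Int)
    (os' cls' : List Int) (h1 : pvSkip e os = start :: os') (h2 : pvSkip start cls = e1 :: cls') :
    pvPair content n os cls e =
      (start, start + 2,
        (if e1 + 2 < n ∧ PySem.Str.pyGet? content (e1 + 2) = some ']' then e1 + 1 else e1),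
        (if e1 + 2 < n ∧ PySem.Str.pyGet? content (e1 + 2) = some ']' then e1 + 1 else e1) + 2) ::
      pvPair content n os' (e1 :: cls')
        (if e1 + 2 < n ∧ PySem.Str.pyGet? content (e1 + 2) = some ']' then e1 + 1 else e1) := by
  rw [pvPair, h1]
  show (match pvSkip start cls with
    | [] => ([] : List (Int × Int × Int × Int))
    | e1 :: cls' =>
      let e2 := if e1 + 2 < n ∧ PySem.Str.pyGet? content (e1 + 2) = some ']' then e1 + 1 else e1
      (start, start + 2, e2, e2 + 2) :: pvPair content n os' (e1 :: cls') e2) = _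
  rw [h2]

lemma pvLoopA_succ (content : String) (L e : Int) (fuel : Nat) :
    pvLoopA content L e (fuel + 1) =
      (let start := PySem.Str.findFrom content "[[" e
       if start = -1 then []
       else
         let e1 := PySem.Str.findFrom content "]]" start
         if e1 = -1 then []
         else
           let e2 := if e1 + 2 < L ∧ PySem.Str.pyGet? content (e1 + 2) = some ']' then e1 + 1 else e1
           (start, start + 2, e2, e2 + 2) :: pvLoopA content L e2 fuel) := rfl

lemma pvPat1 : "[[".toList = ['[', '['] := rfl
lemma pvPat2 : "]]".toList = [']', ']'] := rfl

-- Main invariant: A's find-loop equals B's pairing walk when os / cls are suffixes of the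
-- occurrence lists whose dropped prefixes lie below the resume index e.
lemma pvMain (content : String) : ∀ (m : Nat) (os cls : List Int) (e fuelA : Nat),
    os.length ≤ m → os.length + 1 ≤ fuelA → e ≤ content.toList.length →
    (∃ d, pvOccs content '[' '[' = d ++ os ∧ ∀ x ∈ d, x < (e : Int)) →
    (∃ d, pvOccs content ']' ']' = d ++ cls ∧ ∀ x ∈ d, x < (e : Int)) →
    pvLoopA content (PySem.Str.len content) ((e : Nat) : Int) fuelA
      = pvPair content (PySem.Str.len content) os cls ((e : Nat) : Int) := by
  intro m
  induction m with
  | zero =>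
    intro os cls e fuelA hm hf he hos hcls
    obtain rfl : os = [] := List.eq_nil_of_length_eq_zero (by omega)
    obtain ⟨fA, rfl⟩ : ∃ fA, fuelA = fA + 1 := ⟨fuelA - 1, by omega⟩
    obtain ⟨d, hd, hdlt⟩ := hos
    have hskip : pvSkip ((e : Nat) : Int) (pvOccs content '[' '[') = [] := by
      rw [hd, pvSkip_append _ _ _ hdlt]; rfl
    have hfind0 := pvFind_eq content '[' '[' e he
    rw [hskip] at hfind0
    have hfind : PySem.Chars.findFrom content.toList ['[', '['] ((e : Nat) : Int) = -1 := hfind0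
    rw [pvLoopA_succ, pvPair_nil content _ [] cls _ rfl]
    simp only [PySem.Str.findFrom_eq, pvPat1]
    rw [hfind]
    simp
  | succ m ih =>
    intro os cls e fuelA hm hf he hos hcls
    obtain ⟨fA, rfl⟩ : ∃ fA, fuelA = fA + 1 := ⟨fuelA - 1, by omega⟩
    obtain ⟨d, hd, hdlt⟩ := hos
    have hskipO : pvSkip ((e : Nat) : Int) (pvOccs content '[' '[')
        = pvSkip ((e : Nat) : Int) os := by
      rw [hd, pvSkip_append _ _ _ hdlt]
    have hfind := pvFind_eq content '[' '[' e he
    rw [hskipO] at hfind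
    cases hsos : pvSkip ((e : Nat) : Int) os with
    | nil =>
      rw [hsos] at hfind
      have hfind' : PySem.Chars.findFrom content.toList ['[', '['] ((e : Nat) : Int) = -1 := hfind
      rw [pvLoopA_succ, pvPair_nil content _ os cls _ hsos]
      simp only [PySem.Str.findFrom_eq, pvPat1]
      rw [hfind']
      simp
    | cons start os' =>
      rw [hsos] at hfind
      have hfind' : PySem.Chars.findFrom content.toList ['[', '['] ((e : Nat) : Int) = start := hfind
      clear hfind
      obtain ⟨d2, hd2, hd2lt⟩ := pvSkip_decomp ((e : Nat) : Int) os
      rw [hsos] at hd2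
      have hstartO : start ∈ pvOccs content '[' '[' := by rw [hd, hd2]; simp
      obtain ⟨sn, rfl⟩ : ∃ sn : Nat, start = (sn : Int) :=
        ⟨start.toNat, by have := pvOccs_nonneg content '[' '[' start hstartO; omega⟩
      have hesn : e ≤ sn := by
        have := pvSkip_head_ge _ _ _ _ hsos; exact_mod_cast this
      obtain ⟨hsn1, hsnc⟩ := pvOccs_char content '[' '[' sn hstartO
      obtain ⟨dc, hdc, hdclt⟩ := hcls
      have hskipC : pvSkip ((sn : Nat) : Int) (pvOccs content ']' ']')
          = pvSkip ((sn : Nat) : Int) cls := by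
        rw [hdc]
        exact pvSkip_append _ _ _ (fun x hx => lt_of_lt_of_le (hdclt x hx) (by exact_mod_cast hesn))
      have hfind2 := pvFind_eq content ']' ']' sn (by omega)
      rw [hskipC] at hfind2
      cases hscl : pvSkip ((sn : Nat) : Int) cls with
      | nil =>
        rw [hscl] at hfind2
        have hfind2' : PySem.Chars.findFrom content.toList [']', ']'] ((sn : Nat) : Int) = -1 := hfind2
        rw [pvLoopA_succ, pvPair_cons_nil content _ os cls _ _ os' hsos hscl]
        simp only [PySem.Str.findFrom_eq, pvPat1, pvPat2]
        rw [hfind']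
        rw [if_neg (by omega), hfind2']
        simp
      | cons e1 cls' =>
        rw [hscl] at hfind2
        have hfind2' : PySem.Chars.findFrom content.toList [']', ']'] ((sn : Nat) : Int) = e1 := hfind2
        clear hfind2
        obtain ⟨dc2, hdc2, hdc2lt⟩ := pvSkip_decomp ((sn : Nat) : Int) cls
        rw [hscl] at hdc2
        have he1C : e1 ∈ pvOccs content ']' ']' := by rw [hdc, hdc2]; simp
        obtain ⟨cn, rfl⟩ : ∃ cn : Nat, e1 = (cn : Int) :=
          ⟨e1.toNat, by have := pvOccs_nonneg content ']' ']' e1 he1C; omega⟩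
        have hsncn : sn ≤ cn := by
          have := pvSkip_head_ge _ _ _ _ hscl; exact_mod_cast this
        obtain ⟨hcn1, hcnc⟩ := pvOccs_char content ']' ']' cn he1C
        have hsnltcn : sn < cn := by
          rcases Nat.lt_or_ge sn cn with h | h
          · exact h
          · exfalso
            have heq : sn = cn := by omega
            subst heq
            rw [hsnc] at hcnc
            exact absurd hcnc (by decide)
        rw [pvLoopA_succ, pvPair_cons_cons content _ os cls _ _ _ os' cls' hsos hscl]
        simp only [PySem.Str.findFrom_eq, pvPat1, pvPat2]
        rw [hfind']
        rw [if_neg (by omega), hfind2', if_neg (by omega)]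
        -- the adjusted end index, as a natural number
        obtain ⟨e2n, he2, hcne2, he2cn⟩ :
            ∃ e2n : Nat,
              (if ((cn : Nat) : Int) + 2 < PySem.Str.len content ∧
                  PySem.Str.pyGet? content (((cn : Nat) : Int) + 2) = some ']'
                then ((cn : Nat) : Int) + 1 else ((cn : Nat) : Int)) = (e2n : Int)
                ∧ cn < e2n + 1 ∧ e2n ≤ cn + 1 := by
          split_ifs
          · exact ⟨cn + 1, by push_cast; ring, by omega, by omega⟩
          · exact ⟨cn, rfl, by omega, by omega⟩
        rw [he2]
        congr 1
        refine ih os' ((cn : Int) :: cls') e2n fA (by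
            have hlth := congrArg List.length hd2
            simp at hlth
            omega) (by
            have hlth := congrArg List.length hd2
            simp at hlth
            omega) (by omega) ?_ ?_
        · refine ⟨d ++ d2 ++ [(sn : Int)], by rw [hd, hd2]; simp, ?_⟩
          intro x hx
          have he2' : ((e : Nat) : Int) ≤ ((e2n : Nat) : Int) := by exact_mod_cast (by omega : e ≤ e2n)
          rcases List.mem_append.mp hx with hx | hx
          · rcases List.mem_append.mp hx with hx | hx
            · have := hdlt x hx
              omega
            · have := hd2lt x hx
              omega
          · have hxe : x = ((sn : Nat) : Int) := by simpa using hx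
            subst hxe
            exact_mod_cast (by omega : sn < e2n)
        · refine ⟨dc ++ dc2, by rw [hdc, hdc2]; simp, ?_⟩
          intro x hx
          have he2' : ((e : Nat) : Int) ≤ ((e2n : Nat) : Int) := by exact_mod_cast (by omega : e ≤ e2n)
          have hs2' : ((sn : Nat) : Int) ≤ ((e2n : Nat) : Int) := by exact_mod_cast (by omega : sn ≤ e2n)
          rcases List.mem_append.mp hx with hx | hx
          · have := hdclt x hx
            omega
          · have := hdc2lt x hx
            omega

-- ===== VERDICT (by name: the statement is the Claim_ definition above) =====
theorem find_roll_expr_indices_py_spec : Claim_equal_find_roll_expr_indices_py := by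
  unfold Claim_equal_find_roll_expr_indices_py
  intro content _hdom
  unfold Spec_find_roll_expr_indices_py
  unfold find_roll_expr_indices_py find_roll_expr_indices_py_alt
  have hlen : (pvOccs content '[' '[').length ≤ content.toList.length := by
    refine le_trans (List.length_filter_le _ _) ?_
    rw [PySem.List.length_pyRange_one, PySem.Str.len_eq]
    omega
  have h := pvMain content (pvOccs content '[' '[').length (pvOccs content '[' '[')
    (pvOccs content ']' ']') 0 (content.toList.length + 1) le_rfl (by omega) (by omega)
    ⟨[], by simp⟩ ⟨[], by simp⟩
  simpa [pvOccs] using h
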